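-- pv_equiv track=rewrite | github.com/Mikaelow/leetcodePython | zigzagConversion.py | howManyColums
-- ===== SOURCE A (Python) =====
-- def howManyColums(s: str, numRows):
--     counter = 0
--     i = 0
--     while i < len(s):
--         if counter % numRows == 0:
--             i += numRows
--         else:
--             i += 1
--         counter += 1
--     return counter - 1
-- ===== SOURCE B (Python) =====
-- def howManyColums(s: str, numRows):
--     # closed form: invert the step function instead of simulating it
--     n = len(s)
--     if n == 0:
--         return -1
--     q, r0 = divmod(n - 1, 2 * numRows - 1)
--     rem = r0 + 1
--     t = max(1, rem - numRows + 1)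
--     return q * numRows + t - 1
-- ===== Notes on version B (the rewrite author's own statement) =====
-- stated objective: faster
-- what changed: B replaces A's step-by-step simulation of the zigzag walk (one loop iteration per column) by a closed-form inversion: one divmod by the period 2*numRows-1 plus a max yields the final counter directly.
-- outside the precondition, e.g. on howManyColums('x', 0): A raises ZeroDivisionError, B returns 1
import Mathlib
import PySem

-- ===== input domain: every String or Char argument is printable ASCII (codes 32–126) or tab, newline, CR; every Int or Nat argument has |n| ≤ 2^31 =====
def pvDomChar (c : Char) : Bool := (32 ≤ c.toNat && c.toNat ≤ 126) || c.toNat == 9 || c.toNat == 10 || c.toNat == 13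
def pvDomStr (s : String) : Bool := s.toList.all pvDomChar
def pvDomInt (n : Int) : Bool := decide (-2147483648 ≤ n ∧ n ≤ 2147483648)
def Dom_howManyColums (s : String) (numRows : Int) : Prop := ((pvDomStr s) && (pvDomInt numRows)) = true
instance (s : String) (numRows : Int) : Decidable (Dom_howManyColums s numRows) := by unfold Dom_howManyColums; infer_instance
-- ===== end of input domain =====

-- B replaces A's per-column simulation loop by a closed-form divmod inversion (measurably faster, asymptotic O(1) vs O(len(s))).
-- Pre_ excludes inputs where A raises (numRows == 0 with nonempty s: ZeroDivisionError) or diverges (numRows < 0 with nonempty s).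


-- ===== PORT A =====
-- literal transliteration of A's while loop; fuel bounds the iteration count
-- (under Pre_ each iteration increases i by at least 1, so length+1 fuel is never exhausted)
def howManyColumsLoop (n numRows : Int) (fuel : Nat) (i counter : Int) : Int :=
  match fuel with
  | 0 => counter - 1
  | fuel + 1 =>
    if i < n then
      howManyColumsLoop n numRows fuel
        (if PySem.Int.mod counter numRows = 0 then i + numRows else i + 1)
        (counter + 1)
    else counter - 1

def howManyColums (s : String) (numRows : Int) : Int :=
  howManyColumsLoop (s.toList.length : Int) numRows (s.toList.length + 1) 0 0

-- ===== PORT B =====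
def howManyColums_alt (s : String) (numRows : Int) : Int :=
  let n : Int := (s.toList.length : Int)
  if n = 0 then -1
  else
    let q := PySem.Int.floordiv (n - 1) (2 * numRows - 1)
    let r0 := PySem.Int.mod (n - 1) (2 * numRows - 1)
    let rem := r0 + 1
    let t := max 1 (rem - numRows + 1)
    q * numRows + t - 1

-- ===== PRECONDITION & SPEC =====
-- Pre_ excludes nonempty s with numRows ≤ 0: there A raises ZeroDivisionError (numRows = 0) or loops forever (numRows < 0).
def Pre_howManyColums (s : String) (numRows : Int) : Prop := s.toList = [] ∨ 1 ≤ numRows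
instance (s : String) (numRows : Int) : Decidable (Pre_howManyColums s numRows) := by unfold Pre_howManyColums; infer_instance
def pvWitness_howManyColums : String × Int := ("ab", 3)

def Spec_howManyColums (s : String) (numRows : Int) (out : Int) : Prop := out = howManyColums_alt s numRows
instance (s : String) (numRows : Int) (out : Int) : Decidable (Spec_howManyColums s numRows out) := by unfold Spec_howManyColums; infer_instance

-- ===== CLAIM (what is proved, stated in full; the proofs are below) =====
def Claim_equal_howManyColums : Prop := ∀ (s : String) (numRows : Int), Dom_howManyColums s numRows → Pre_howManyColums s numRows → Spec_howManyColums s numRows (howManyColums s numRows)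

-- ===== LEMMAS AND PROOFS =====

-- i as a function of counter: after c iterations, i = c + ceil(c/r)*(r-1)
def pvF (r c : Int) : Int := c + ((c + r - 1) / r) * (r - 1)

lemma pv_ediv_decomp (a b r : Int) (h0 : 0 ≤ b) (hb : b < r) : (b + r * a) / r = a := by
  rw [Int.add_mul_ediv_left b a (by omega : r ≠ 0), Int.ediv_eq_zero_of_lt h0 hb, zero_add]

lemma pvF_zero (r : Int) (hr : 1 ≤ r) : pvF r 0 = 0 := by
  unfold pvF
  rw [show (0 : Int) + r - 1 = (r - 1) + r * 0 by ring,
    pv_ediv_decomp 0 (r-1) r (by omega) (by omega)]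
  ring

lemma pvF_step (r c : Int) (hr : 1 ≤ r) (_hc : 0 ≤ c) :
    pvF r (c + 1) = pvF r c + (if c % r = 0 then r else 1) := by
  have hrpos : (0 : Int) < r := by omega
  set a := c / r with ha
  set b := c % r with hb
  have hb0 : 0 ≤ b := Int.emod_nonneg c (by omega)
  have hbr : b < r := Int.emod_lt_of_pos c hrpos
  have hcab : c = r * a + b := by rw [ha, hb]; exact (Int.mul_ediv_add_emod c r).symm
  have h1 : (c + 1 + r - 1) = b + r * (a + 1) := by rw [hcab]; ring
  have e1 : (c + 1 + r - 1) / r = a + 1 := by rw [h1, pv_ediv_decomp (a+1) b r hb0 hbr]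
  by_cases hbz : b = 0
  · have h2 : (c + r - 1) = (r - 1) + r * a := by rw [hcab, hbz]; ring
    have e2 : (c + r - 1) / r = a := by rw [h2, pv_ediv_decomp a (r-1) r (by omega) (by omega)]
    rw [if_pos (show c % r = 0 by rw [← hb]; exact hbz)]
    simp only [pvF, e1, e2]
    ring
  · have h2 : (c + r - 1) = (b - 1) + r * (a + 1) := by rw [hcab]; ring
    have e2 : (c + r - 1) / r = a + 1 := by rw [h2, pv_ediv_decomp (a+1) (b-1) r (by omega) (by omega)]
    rw [if_neg (show ¬ c % r = 0 by rw [← hb]; exact hbz)]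
    simp only [pvF, e1, e2]
    ring

lemma pvF_step_ge (r c : Int) (hr : 1 ≤ r) (hc : 0 ≤ c) : pvF r c + 1 ≤ pvF r (c + 1) := by
  rw [pvF_step r c hr hc]; split_ifs <;> omega

lemma pvF_mono (r : Int) (hr : 1 ≤ r) :
    ∀ (k : Nat) (c : Int), 0 ≤ c → pvF r c ≤ pvF r (c + k) := by
  intro k
  induction k with
  | zero => intro c _; simp
  | succ m ih =>
    intro c hc
    have h1 := ih c hc
    have h2 := pvF_step_ge r (c + m) hr (by positivity)
    have : (c + (m + 1 : Nat) : Int) = (c + m) + 1 := by push_cast; ring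
    rw [this]; omega

lemma pvLoop_eq (n r : Int) (hr : 1 ≤ r) (K : Int) (hK : n ≤ pvF r K)
    (hmin : ∀ k, 0 ≤ k → k < K → pvF r k < n) :
    ∀ (fuel : Nat) (c : Int), 0 ≤ c → c ≤ K → n ≤ pvF r c + fuel →
      howManyColumsLoop n r fuel (pvF r c) c = K - 1 := by
  intro fuel
  induction fuel with
  | zero =>
    intro c hc hcK hfuel
    have : c = K := by
      by_contra hne
      have hck : c < K := by omega
      have := hmin c hc hck
      push_cast at hfuel
      omega
    simp [howManyColumsLoop, this]
  | succ m ih =>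
    intro c hc hcK hfuel
    by_cases hlt : pvF r c < n
    · have hcK' : c < K := by
        by_contra hge
        have heq : c = K := by omega
        rw [heq] at hlt
        omega
      have hmod : PySem.Int.mod c r = c % r := PySem.Int.mod_eq_emod_of_pos (by omega)
      have hstep : (if PySem.Int.mod c r = 0 then pvF r c + r else pvF r c + 1) = pvF r (c + 1) := by
        rw [hmod, pvF_step r c hr hc]; split_ifs <;> ring
      rw [howManyColumsLoop, if_pos hlt, hstep]
      refine ih (c + 1) (by omega) (by omega) ?_
      have hge := pvF_step_ge r c hr hc
      push_cast at hfuel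
      omega
    · have : c = K := by
        by_contra hne
        exact hlt (hmin c hc (by omega))
      rw [howManyColumsLoop, if_neg hlt, this]

-- ===== VERDICT (by name: the statement is the Claim_ definition above) =====
theorem howManyColums_spec : Claim_equal_howManyColums := by
  intro s numRows _hdom hpre
  unfold Spec_howManyColums howManyColums howManyColums_alt
  rcases hpre with hemp | hr
  · simp [hemp, howManyColumsLoop]
  · set n : Int := (s.toList.length : Int) with hn
    have hn0 : 0 ≤ n := by positivity
    by_cases hz : n = 0
    · have hl : s.toList.length = 0 := by omega
      simp [hn, hl, howManyColumsLoop]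
    · have hn1 : 1 ≤ n := by omega
      have hd : (0 : Int) < 2 * numRows - 1 := by omega
      rw [if_neg hz]
      set q := PySem.Int.floordiv (n - 1) (2 * numRows - 1) with hq
      set r0 := PySem.Int.mod (n - 1) (2 * numRows - 1) with hr0
      have hqe : q = (n - 1) / (2 * numRows - 1) := by
        rw [hq, PySem.Int.floordiv_eq_ediv_of_pos hd]
      have hr0e : r0 = (n - 1) % (2 * numRows - 1) := by
        rw [hr0, PySem.Int.mod_eq_emod_of_pos hd]
      have hdec : n - 1 = (2 * numRows - 1) * q + r0 := by
        rw [hqe, hr0e]; exact (Int.mul_ediv_add_emod (n - 1) (2 * numRows - 1)).symm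
      have hr00 : 0 ≤ r0 := hr0e ▸ Int.emod_nonneg _ (by omega)
      have hr0lt : r0 < 2 * numRows - 1 := hr0e ▸ Int.emod_lt_of_pos _ hd
      have hq0 : 0 ≤ q := by rw [hqe]; exact Int.ediv_nonneg (by omega) (by omega)
      set t := max 1 (r0 + 1 - numRows + 1) with ht
      have ht1 : 1 ≤ t := le_max_left _ _
      have htr : t ≤ numRows := by
        rw [ht]; apply max_le (by omega) (by omega)
      set K := q * numRows + t with hK
      have hqr0 : 0 ≤ q * numRows := mul_nonneg hq0 (by omega)
      have hK1 : 1 ≤ K := by omega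
      -- f at K
      have hfK : pvF numRows K = q * (2 * numRows - 1) + t + numRows - 1 := by
        have h1 : (K + numRows - 1) = (t - 1) + numRows * (q + 1) := by rw [hK]; ring
        rw [pvF, h1, pv_ediv_decomp (q+1) (t-1) numRows (by omega) (by omega)]
        rw [hK]; ring
      have hKge : n ≤ pvF numRows K := by
        rw [hfK]
        have h1 : t ≥ r0 + 1 - numRows + 1 := le_max_right _ _
        have h2 : (2 * numRows - 1) * q = q * (2 * numRows - 1) := mul_comm _ _
        omega
      -- f at K - 1 is < n
      have hfK1 : pvF numRows (K - 1) < n := by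
        by_cases ht2 : 2 ≤ t
        · have hteq : t = r0 + 1 - numRows + 1 := by
            rw [ht]; rw [ht] at ht2; omega
          have h1 : (K - 1 + numRows - 1) = (t - 2) + numRows * (q + 1) := by rw [hK]; ring
          rw [pvF, h1, pv_ediv_decomp (q+1) (t-2) numRows (by omega) (by omega)]
          have h3 : K - 1 + (q + 1) * (numRows - 1) = q * (2 * numRows - 1) + t + numRows - 2 := by
            rw [hK]; ring
          have h2 : (2 * numRows - 1) * q = q * (2 * numRows - 1) := mul_comm _ _
          omega
        · have hteq : t = 1 := by omega
          have h1 : (K - 1 + numRows - 1) = (numRows - 1) + numRows * q := by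
            rw [hK, hteq]; ring
          rw [pvF, h1, pv_ediv_decomp q (numRows - 1) numRows (by omega) (by omega)]
          have h3 : K - 1 + q * (numRows - 1) = q * (2 * numRows - 1) := by
            rw [hK, hteq]; ring
          have h2 : (2 * numRows - 1) * q = q * (2 * numRows - 1) := mul_comm _ _
          omega
      have hmin : ∀ k, 0 ≤ k → k < K → pvF numRows k < n := by
        intro k hk0 hkK
        have hstep : pvF numRows k ≤ pvF numRows (K - 1) := by
          have := pvF_mono numRows hr (K - 1 - k).toNat k hk0
          have he : (k + ((K - 1 - k).toNat : Int)) = K - 1 := by omega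
          rwa [he] at this
        omega
      have hfinal := pvLoop_eq n numRows hr K hKge hmin
        (s.toList.length + 1) 0 le_rfl (by omega)
        (by rw [pvF_zero numRows hr]; push_cast; omega)
      rw [pvF_zero numRows hr] at hfinal
      rw [hfinal, hK]
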